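-- pv_equiv track=rewrite | github.com/hooni-dev-0104/reviewers | crawler/sources/seeded.py | _split_4blog_title_annotations
-- ===== SOURCE A (Python) =====
-- def _split_4blog_title_annotations(title: str) -> tuple[list[str], str]:
--     annotations: list[str] = []
--     remaining = title.strip()
--     while remaining.startswith("["):
--         end = remaining.find("]")
--         if end == -1:
--             break
--         annotations.append(remaining[1:end].strip())
--         remaining = remaining[end + 1 :].strip()
--     return annotations, remaining or title.strip()
-- ===== SOURCE B (Python) =====
-- def _split_4blog_title_annotations(title: str) -> tuple[list[str], str]:
--     annotations: list[str] = []
--     s = title.strip()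
--     i = 0
--     n = len(s)
--     while i < n and s[i] == "[":
--         j = s.find("]", i)
--         if j == -1:
--             break
--         annotations.append(s[i + 1 : j].strip())
--         i = j + 1
--         while i < n and s[i].isspace():
--             i += 1
--     remaining = s[i:]
--     return annotations, remaining or s
-- ===== Notes on version B (the rewrite author's own statement) =====
-- stated objective: alternative
-- what changed: Replaces the repeated strip-and-reslice loop (which rebuilds the remaining string for every bracket) by a single stripped copy walked with an integer cursor: find the closing bracket from the cursor, slice out only the annotation, and skip inter-bracket whitespace by advancing the index, so no intermediate remaining-string copies are made.
import Mathlib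
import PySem

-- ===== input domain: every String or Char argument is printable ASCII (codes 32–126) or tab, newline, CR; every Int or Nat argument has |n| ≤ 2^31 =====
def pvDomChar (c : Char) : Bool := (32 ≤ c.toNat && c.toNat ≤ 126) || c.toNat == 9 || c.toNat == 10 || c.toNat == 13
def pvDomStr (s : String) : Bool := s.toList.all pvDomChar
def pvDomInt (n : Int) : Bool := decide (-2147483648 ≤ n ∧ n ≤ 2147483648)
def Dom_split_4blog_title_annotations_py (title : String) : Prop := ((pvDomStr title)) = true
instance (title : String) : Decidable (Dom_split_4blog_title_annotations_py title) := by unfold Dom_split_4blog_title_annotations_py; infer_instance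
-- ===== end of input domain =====

-- B strips the title once and walks it with an integer cursor (one linear pass, no
-- intermediate remaining-string copies), instead of A's repeated strip-and-reslice loop.


-- ===== PORT A =====

-- termination helper for pvA_loop (cited in its decreasing_by)
theorem pvA_strip_slice_lt (rem : List Char) (e : Int)
    (hp : PySem.Chars.startswith rem ['['] = true) (he : e = PySem.Chars.find rem [']'])
    (hne : ¬ e = -1) :
    (PySem.Chars.strip (PySem.Chars.slice rem (some (e + 1)) none)).length < rem.length := by
  have h0 : (0:Int) ≤ e := by
    have := PySem.Chars.neg_one_le_find rem [']']
    omega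
  have hlen : 1 ≤ rem.length := by
    cases rem with
    | nil => simp [PySem.Chars.startswith, List.isPrefixOf] at hp
    | cons a l => simp
  rw [PySem.Chars.slice_eq_listSlice, PySem.List.slice_from rem (a := e + 1) (by omega)]
  have hstrip : (PySem.Chars.strip (rem.drop (e+1).toNat)).length
      ≤ (rem.drop (e+1).toNat).length := by
    simp only [PySem.Chars.strip, PySem.Chars.rstrip, PySem.Chars.lstrip]
    calc (List.dropWhile PySem.Chars.isspace
            (List.dropWhile PySem.Chars.isspace (rem.drop (e+1).toNat)).reverse).reverse.length
        ≤ (List.dropWhile PySem.Chars.isspace (rem.drop (e+1).toNat)).reverse.length := by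
          rw [List.length_reverse]; exact List.length_dropWhile_le _ _
      _ ≤ (rem.drop (e+1).toNat).length := by
          rw [List.length_reverse]; exact List.length_dropWhile_le _ _
  have hd : (rem.drop (e+1).toNat).length = rem.length - (e+1).toNat := List.length_drop
  have h1 : 1 ≤ (e+1).toNat := by omega
  omega

def pvA_loop (rem : List Char) (acc : List (List Char)) : List (List Char) × List Char :=
  if _hp : PySem.Chars.startswith rem ['['] = true then
    let e := PySem.Chars.find rem [']']
    if _he : e = -1 then (acc, rem)
    else
      pvA_loop (PySem.Chars.strip (PySem.Chars.slice rem (some (e + 1)) none))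
        (acc ++ [PySem.Chars.strip (PySem.Chars.slice rem (some 1) (some e))])
  else (acc, rem)
termination_by rem.length
decreasing_by exact pvA_strip_slice_lt rem _ _hp rfl _he

def split_4blog_title_annotations_py (title : String) : List String × String :=
  let r := pvA_loop (PySem.Chars.strip title.toList) []
  (r.1.map String.ofList,
   String.ofList (if r.2 = [] then PySem.Chars.strip title.toList else r.2))

-- ===== PORT B =====

-- inner `while i < n and s[i].isspace(): i += 1` loop
def pvB_skip (s : List Char) (i : Nat) : Nat :=
  if h : i < s.length then
    if PySem.Chars.isspace s[i] then pvB_skip s (i + 1) else i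
  else i
termination_by s.length - i

-- cursor never moves backwards (cited in pvB_loop's decreasing_by)
theorem pvB_skip_ge (s : List Char) (i : Nat) : i ≤ pvB_skip s i := by
  fun_induction pvB_skip s i with
  | case1 i h hsp ih => omega
  | case2 i h hsp => omega
  | case3 i h => omega

def pvB_loop (s : List Char) (i : Nat) (acc : List (List Char)) : List (List Char) × Nat :=
  if h : i < s.length then
    if s[i] = '[' then
      let j := PySem.Chars.findFrom s [']'] (i : Int)
      if hj : j = -1 then (acc, i)
      else
        pvB_loop s (pvB_skip s (j + 1).toNat)
          (acc ++ [PySem.Chars.strip (PySem.Chars.slice s (some ((i : Int) + 1)) (some j))])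
    else (acc, i)
  else (acc, i)
termination_by s.length - i
decreasing_by
  have hge : (PySem.Chars.findFrom s [']'] (i : Int) + 1).toNat ≤
      pvB_skip s (PySem.Chars.findFrom s [']'] (i : Int) + 1).toNat := pvB_skip_ge _ _
  have hik : (i : Nat) ≤ s.length := le_of_lt h
  have hspec := PySem.Chars.findFrom_natCast_spec s [']'] i hik hj
  omega

def split_4blog_title_annotations_py_alt (title : String) : List String × String :=
  let s := PySem.Chars.strip title.toList
  let r := pvB_loop s 0 []
  let remaining := PySem.Chars.slice s (some (r.2 : Int)) none
  (r.1.map String.ofList, String.ofList (if remaining = [] then s else remaining))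

-- ===== PRECONDITION & SPEC =====
def Spec_split_4blog_title_annotations_py (title : String) (out : List String × String) : Prop := out = split_4blog_title_annotations_py_alt title
instance (title : String) (out : List String × String) : Decidable (Spec_split_4blog_title_annotations_py title out) := by unfold Spec_split_4blog_title_annotations_py; infer_instance

-- ===== CLAIM (what is proved, stated in full; the proofs are below) =====
def Claim_equal_split_4blog_title_annotations_py : Prop := ∀ (title : String), Dom_split_4blog_title_annotations_py title → Spec_split_4blog_title_annotations_py title (split_4blog_title_annotations_py title)

-- ===== LEMMAS AND PROOFS =====

-- dropWhile fixes every prefix of a list it fixes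
theorem pv_dropWhile_prefix {p : Char → Bool} {l l' : List Char}
    (hpre : l' <+: l) (hl : List.dropWhile p l = l) : List.dropWhile p l' = l' := by
  rw [List.dropWhile_eq_self_iff] at *
  cases l' with
  | nil => simp
  | cons a t =>
    obtain ⟨u, hu⟩ := hpre
    cases l with
    | nil => simp at hu
    | cons b m =>
      injection hu with h1 h2
      intro _
      subst h1
      exact hl (by simp) 

-- rstrip s is a prefix of s
theorem pv_rstrip_prefix (s : List Char) : PySem.Chars.rstrip s <+: s := by
  simp only [PySem.Chars.rstrip]
  obtain ⟨u, hu⟩ : List.dropWhile PySem.Chars.isspace s.reverse <:+ s.reverse :=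
    List.dropWhile_suffix _
  exact ⟨u.reverse, by rw [← List.reverse_append, hu, List.reverse_reverse]⟩

-- a left-cut of a right-stripped list is right-stripped
theorem pv_rstrip_drop {s : List Char} (hr : PySem.Chars.rstrip s = s) (k : Nat) :
    PySem.Chars.rstrip (s.drop k) = s.drop k := by
  simp only [PySem.Chars.rstrip] at *
  have hpre : (s.drop k).reverse <+: s.reverse := by
    rw [List.reverse_drop]
    exact List.take_prefix _ _
  have hfix : List.dropWhile PySem.Chars.isspace s.reverse = s.reverse := by
    have := congrArg List.reverse hr
    rwa [List.reverse_reverse] at this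
  rw [pv_dropWhile_prefix hpre hfix, List.reverse_reverse]


-- lstrip of a tail = advancing the cursor past whitespace
theorem pv_lstrip_drop (s : List Char) (k : Nat) :
    PySem.Chars.lstrip (s.drop k) = s.drop (pvB_skip s k) := by
  fun_induction pvB_skip s k with
  | case1 i h hsp ih =>
    rw [← ih]
    have hdk : s.drop i = s[i] :: s.drop (i+1) := List.drop_eq_getElem_cons h
    rw [PySem.Chars.lstrip, hdk, List.dropWhile_cons, if_pos hsp, PySem.Chars.lstrip]
  | case2 i h hsp =>
    have hdk : s.drop i = s[i] :: s.drop (i+1) := List.drop_eq_getElem_cons h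
    rw [PySem.Chars.lstrip, hdk, List.dropWhile_cons, if_neg (by simp [hsp])]
  | case3 i h =>
    have : s.drop i = [] := List.drop_eq_nil_of_le (by omega)
    simp [PySem.Chars.lstrip, this]

theorem pvB_skip_le {s : List Char} {k : Nat} (h : k ≤ s.length) : pvB_skip s k ≤ s.length := by
  fun_induction pvB_skip s k with
  | case1 i hi hsp ih => exact ih (by omega)
  | case2 i hi hsp => omega
  | case3 i hi => omega

-- main loop correspondence: A's remaining string is s.drop of B's cursor
theorem pv_main (s : List Char) (hr : PySem.Chars.rstrip s = s) (i : Nat)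
    (hil : i ≤ s.length) (hclean : PySem.Chars.lstrip (s.drop i) = s.drop i)
    (acc : List (List Char)) :
    pvA_loop (s.drop i) acc = ((pvB_loop s i acc).1, s.drop (pvB_loop s i acc).2) := by
  fun_induction pvB_loop s i acc with
  | case1 i acc h hbr j hj =>
    have hdk : s.drop i = s[i] :: s.drop (i+1) := List.drop_eq_getElem_cons h
    have hsw : PySem.Chars.startswith (s.drop i) ['['] = true := by
      simp [PySem.Chars.startswith, List.isPrefixOf, hdk, hbr]
    have hfind := PySem.Chars.findFrom_natCast s [']'] i hil
    have he : PySem.Chars.find (s.drop i) [']'] = -1 := by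
      by_cases hc : PySem.Chars.find (s.drop i) [']'] = -1
      · exact hc
      · exfalso
        have h0 : (0:Int) ≤ PySem.Chars.find (s.drop i) [']'] := by
          have := PySem.Chars.neg_one_le_find (s.drop i) [']']
          omega
        have hj2 : PySem.Chars.findFrom s [']'] (i:Int) = -1 := hj
        rw [hfind, if_neg hc] at hj2
        omega
    rw [pvA_loop]
    simp [hsw, he]
  | case2 i acc h hbr j hj ih =>
    have hdk : s.drop i = s[i] :: s.drop (i+1) := List.drop_eq_getElem_cons h
    have hsw : PySem.Chars.startswith (s.drop i) ['['] = true := by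
      simp [PySem.Chars.startswith, List.isPrefixOf, hdk, hbr]
    have hfind := PySem.Chars.findFrom_natCast s [']'] i hil
    have he : ¬ PySem.Chars.find (s.drop i) [']'] = -1 := by
      intro hc
      have hj2 : ¬ PySem.Chars.findFrom s [']'] (i:Int) = -1 := hj
      rw [hfind, if_pos hc] at hj2
      exact hj2 rfl
    have h0 : (0:Int) ≤ PySem.Chars.find (s.drop i) [']'] := by
      have := PySem.Chars.neg_one_le_find (s.drop i) [']']
      omega
    have hje : j = (i : Int) + PySem.Chars.find (s.drop i) [']'] := by
      show PySem.Chars.findFrom s [']'] (i : Int) = _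
      rw [hfind, if_neg he]
    -- abbreviate e as a Nat
    obtain ⟨eN, heN⟩ : ∃ eN : Nat, PySem.Chars.find (s.drop i) [']'] = (eN : Int) :=
      ⟨(PySem.Chars.find (s.drop i) [']']).toNat, by omega⟩
    have hjN : j.toNat = i + eN := by omega
    have hjdef : PySem.Chars.findFrom s [']'] (i:Int) = j := rfl
    have hocc : i + eN < s.length := by
      have hspec := PySem.Chars.findFrom_natCast_spec s [']'] i hil hj
      rw [hjdef] at hspec
      obtain ⟨-, hpre, -⟩ := hspec
      have hlt : j.toNat < s.length := by
        rcases hpre with ⟨u, hu⟩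
        have hlen := congrArg List.length hu
        rw [List.length_append, List.length_drop] at hlen
        simp only [List.length_cons, List.length_nil] at hlen
        omega
      omega
    have hann : PySem.Chars.strip (PySem.Chars.slice (s.drop i) (some 1) (some (PySem.Chars.find (s.drop i) [']']))) =
        PySem.Chars.strip (PySem.Chars.slice s (some ((i:Int) + 1)) (some j)) := by
      simp only [PySem.Chars.slice_eq_listSlice]
      rw [show (i:Int) + 1 = ((i+1 : Nat) : Int) by push_cast; ring,
        show j = ((i + eN : Nat) : Int) by omega,
        PySem.List.slice_natCast,
        heN, show (1:Int) = ((1:Nat):Int) from rfl, PySem.List.slice_natCast,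
        List.drop_drop,
        show (i + eN) - (i + 1) = eN - 1 by omega,
        show i + 1 = 1 + i from by omega]
    have hrem : PySem.Chars.strip (PySem.Chars.slice (s.drop i) (some (PySem.Chars.find (s.drop i) [']'] + 1)) none) =
        s.drop (pvB_skip s (i + eN + 1)) := by
      simp only [PySem.Chars.slice_eq_listSlice]
      rw [PySem.List.slice_from _ (by omega), heN, show ((eN:Int)+1).toNat = eN + 1 by omega,
        List.drop_drop, show (i + (eN + 1)) = (i + eN + 1) by omega]
      show PySem.Chars.rstrip (PySem.Chars.lstrip _) = _
      rw [pv_lstrip_drop s (i + eN + 1)]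
      exact pv_rstrip_drop hr _
    have hski : (j + 1).toNat = i + eN + 1 := by omega
    have hil' : pvB_skip s (i + eN + 1) ≤ s.length := pvB_skip_le (by omega)
    have hclean' : PySem.Chars.lstrip (s.drop (pvB_skip s (i + eN + 1))) = s.drop (pvB_skip s (i + eN + 1)) := by
      rw [← pv_lstrip_drop s (i + eN + 1)]
      show List.dropWhile _ (List.dropWhile _ _) = _
      rw [List.dropWhile_idempotent]
      rw [show List.dropWhile PySem.Chars.isspace (s.drop (i+eN+1)) = PySem.Chars.lstrip (s.drop (i+eN+1)) from rfl,
        pv_lstrip_drop s (i + eN + 1)]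
    rw [pvA_loop]
    simp only [hsw, reduceDIte, he, hann, hrem]
    rw [hski] at ih ⊢
    exact ih hil' hclean'
  | case3 i acc h hbr =>
    have hdk : s.drop i = s[i] :: s.drop (i+1) := List.drop_eq_getElem_cons h
    have hsw : PySem.Chars.startswith (s.drop i) ['['] = false := by
      rw [hdk]
      simp only [PySem.Chars.startswith, List.isPrefixOf, Bool.and_true,
        beq_eq_false_iff_ne, ne_eq]
      exact fun hc => hbr hc.symm
    rw [pvA_loop]
    simp [hsw]
  | case4 i acc h =>
    have hdk : s.drop i = [] := List.drop_eq_nil_of_le (by omega)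
    rw [pvA_loop]
    simp [hdk, PySem.Chars.startswith]

-- ===== VERDICT (by name: the statement is the Claim_ definition above) =====
-- rstrip is idempotent
theorem pv_rstrip_idem (y : List Char) :
    PySem.Chars.rstrip (PySem.Chars.rstrip y) = PySem.Chars.rstrip y := by
  simp only [PySem.Chars.rstrip, List.reverse_reverse, List.dropWhile_idempotent]

theorem split_4blog_title_annotations_py_spec : Claim_equal_split_4blog_title_annotations_py := by
  unfold Claim_equal_split_4blog_title_annotations_py
  intro title _
  unfold Spec_split_4blog_title_annotations_py split_4blog_title_annotations_py
    split_4blog_title_annotations_py_alt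
  have hr : PySem.Chars.rstrip (PySem.Chars.strip title.toList) = PySem.Chars.strip title.toList :=
    pv_rstrip_idem _
  have hc0 : PySem.Chars.lstrip (PySem.Chars.strip title.toList) = PySem.Chars.strip title.toList := by
    show PySem.Chars.lstrip (PySem.Chars.rstrip (PySem.Chars.lstrip title.toList)) = _
    have hfix : List.dropWhile PySem.Chars.isspace (PySem.Chars.lstrip title.toList) =
        PySem.Chars.lstrip title.toList := List.dropWhile_idempotent _ _
    exact pv_dropWhile_prefix (pv_rstrip_prefix _) hfix
  have hm := pv_main (PySem.Chars.strip title.toList) hr 0 (Nat.zero_le _)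
    (by rw [List.drop_zero]; exact hc0) []
  rw [List.drop_zero] at hm
  have hsl : ∀ k : Nat, PySem.Chars.slice (PySem.Chars.strip title.toList) (some (k:Int)) none =
      (PySem.Chars.strip title.toList).drop k := by
    intro k
    simp only [PySem.Chars.slice_eq_listSlice]
    rw [PySem.List.slice_from _ (Int.natCast_nonneg k), Int.toNat_natCast]
  simp only [hm, hsl]
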